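-- pv_equiv track=rewrite | github.com/declare-lab/ASTE-RL | AccCalc.py | find_tail
-- ===== SOURCE A (Python) =====
-- def find_tail(tags, num):
--     """
--     Get the position of the end of the aspect/opinion span in a tagging sequence.
--
--     Args:
--         tags (list): List of tags in a sentence.
--         num (int): Number to look out for that signals the end of an aspect/opinion.
--
--     Returns:
--
--     """
--     last = False
--     for i, x in enumerate(tags):
--         if x != num and last:
--             return i - 1
--         if x == num + 1:
--             last = True
--     return len(tags)-1 if last else -1
-- ===== SOURCE B (Python) =====
-- def find_tail(tags, num):
--     # Staged collect-then-pick: materialise every marker position and every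
--     # break position as lists (no early exit, no flag), then the answer is a
--     # pure selection on those two lists.
--     marks = [i for i, x in enumerate(tags) if x == num + 1]
--     if not marks:
--         return -1
--     breaks = [j for j in range(marks[0] + 1, len(tags)) if tags[j] != num]
--     return breaks[0] - 1 if breaks else len(tags) - 1
-- ===== Notes on version B (the rewrite author's own statement) =====
-- stated objective: alternative
-- what changed: Replaces A's single-pass boolean state machine (a `last` flag with early returns) with a staged collect-then-pick decomposition: one comprehension materialises all marker positions (x == num+1), a second materialises all break positions after the first marker, and the answer is pure selection on those two lists.
import Mathlib
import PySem

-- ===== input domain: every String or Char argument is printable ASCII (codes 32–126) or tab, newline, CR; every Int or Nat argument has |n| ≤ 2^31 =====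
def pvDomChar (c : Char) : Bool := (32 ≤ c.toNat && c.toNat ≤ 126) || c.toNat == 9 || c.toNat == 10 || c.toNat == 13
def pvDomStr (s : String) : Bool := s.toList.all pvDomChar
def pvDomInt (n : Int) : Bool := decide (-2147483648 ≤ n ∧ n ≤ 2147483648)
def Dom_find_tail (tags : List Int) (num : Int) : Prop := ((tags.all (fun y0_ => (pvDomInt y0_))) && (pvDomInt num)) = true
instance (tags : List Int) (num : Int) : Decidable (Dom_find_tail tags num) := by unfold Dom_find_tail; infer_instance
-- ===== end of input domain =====

-- B replaces A's one-pass boolean state machine by a staged collect-then-pick decomposition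
-- (materialise all marker and all break positions, then select); same value on every input (total), no speed claim.

-- ===== PORT A =====
-- A's enumerate loop: i is the current index, `last` the boolean flag.
def findTailLoopA (num : Int) : List Int → Int → Bool → Int
  | [], i, last => if last then i - 1 else -1
  | x :: rest, i, last =>
      if x ≠ num ∧ last then i - 1
      else findTailLoopA num rest (i + 1) (last || (x == num + 1))

def find_tail (tags : List Int) (num : Int) : Int :=
  findTailLoopA num tags 0 false

-- ===== PORT B =====
-- Source B: marks = [i for i, x in enumerate(tags) if x == num + 1]
def marksB (tags : List Int) (num : Int) : List Int :=
  ((PySem.List.enumerate tags).filter (fun p => p.2 == num + 1)).map (fun p => p.1)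

-- Source B: breaks = [j for j in range(s + 1, len(tags)) if tags[j] != num]
-- (every j drawn from the range is in bounds, so pyGetD is exact for tags[j])
def breaksB (tags : List Int) (num : Int) (s : Int) : List Int :=
  (PySem.List.pyRange (s + 1) (tags.length : Int) 1).filter
    (fun j => !(PySem.List.pyGetD tags j 0 == num))

def find_tail_alt (tags : List Int) (num : Int) : Int :=
  match marksB tags num with
  | [] => -1                                         -- if not marks: return -1
  | s :: _ =>
      match breaksB tags num s with                  -- breaks[0] - 1 if breaks else len(tags) - 1
      | [] => (tags.length : Int) - 1
      | b :: _ => b - 1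

-- ===== PRECONDITION & SPEC =====
def Spec_find_tail (tags : List Int) (num : Int) (out : Int) : Prop := out = find_tail_alt tags num
instance (tags : List Int) (num : Int) (out : Int) : Decidable (Spec_find_tail tags num out) := by unfold Spec_find_tail; infer_instance

-- ===== CLAIM (what is proved, stated in full; the proofs are below) =====
def Claim_equal_find_tail : Prop := ∀ (tags : List Int) (num : Int), Dom_find_tail tags num → Spec_find_tail tags num (find_tail tags num)

-- ===== LEMMAS AND PROOFS =====

-- Proof-side middle form: an explicit find-then-extend recursion that both programs reduce to.
def runM (tags : List Int) (num : Int) (i : Nat) : Int :=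
  if h : i + 1 < tags.length ∧ tags.getD (i + 1) 0 = num then runM tags num (i + 1)
  else (i : Int)
termination_by tags.length - i
decreasing_by omega

def seekM (tags : List Int) (num : Int) (i : Nat) : Int :=
  if h : tags.length ≤ i then -1
  else if tags.getD i 0 = num + 1 then runM tags num i
  else seekM tags num (i + 1)
termination_by tags.length - i
decreasing_by omega

-- A's loop, once the flag is set at marker index p, equals runM from p.
theorem loopA_true_eq_run (tags : List Int) (num : Int) (p : Nat) (hp : p < tags.length) :
    findTailLoopA num (tags.drop (p + 1)) ((p : Int) + 1) true = runM tags num p := by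
  by_cases h1 : p + 1 < tags.length
  · have hgetD : tags.getD (p + 1) 0 = tags[p + 1] := by
      simp [List.getD, List.getElem?_eq_getElem h1]
    rw [List.drop_eq_getElem_cons h1]
    by_cases h2 : tags[p + 1] = num
    · have ih := loopA_true_eq_run tags num (p + 1) h1
      rw [runM, dif_pos ⟨h1, by rw [hgetD]; exact h2⟩]
      simp only [findTailLoopA, h2]
      rw [if_neg (by simp)]
      simpa using ih
    · rw [runM, dif_neg (by rw [hgetD]; exact fun hc => h2 hc.2)]
      simp [findTailLoopA, h2]
  · have hd : tags.drop (p + 1) = [] := List.drop_eq_nil_of_le (by omega)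
    rw [hd, runM, dif_neg (by omega)]
    simp [findTailLoopA]
termination_by tags.length - p
decreasing_by omega

-- A's loop with flag false from index i equals seekM from i.
theorem loopA_false_eq_seek (tags : List Int) (num : Int) (i : Nat) :
    findTailLoopA num (tags.drop i) (i : Int) false = seekM tags num i := by
  by_cases h : i < tags.length
  · have hgetD : tags.getD i 0 = tags[i] := by
      simp [List.getD, List.getElem?_eq_getElem h]
    rw [List.drop_eq_getElem_cons h, seekM, dif_neg (by omega)]
    by_cases hx : tags[i] = num + 1
    · rw [if_pos (by rw [hgetD]; exact hx)]
      have hb : (tags[i] == num + 1) = true := by simp [hx]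
      simp only [findTailLoopA, if_neg (by simp : ¬(tags[i] ≠ num ∧ (false : Bool) = true)),
        Bool.false_or, hb]
      exact loopA_true_eq_run tags num i h
    · rw [if_neg (by rw [hgetD]; exact hx)]
      have hb : (tags[i] == num + 1) = false := by simpa using hx
      have ih := loopA_false_eq_seek tags num (i + 1)
      simp only [findTailLoopA, if_neg (by simp : ¬(tags[i] ≠ num ∧ (false : Bool) = true)),
        Bool.false_or, hb]
      simpa [Int.natCast_add] using ih
  · have hd : tags.drop i = [] := List.drop_eq_nil_of_le (by omega)
    rw [hd, seekM, dif_pos (by omega)]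
    simp [findTailLoopA]
termination_by tags.length - i
decreasing_by omega

-- B's break-selection at marker p equals runM from p.
theorem breaks_eq_run (tags : List Int) (num : Int) (p : Nat) (hp : p < tags.length) :
    (match breaksB tags num (p : Int) with
     | [] => (tags.length : Int) - 1
     | b :: _ => b - 1) = runM tags num p := by
  by_cases h1 : p + 1 < tags.length
  · have hcast : (p : Int) + 1 = ((p + 1 : Nat) : Int) := by push_cast; ring
    have hgetD : PySem.List.pyGetD tags ((p : Int) + 1) 0 = tags[p + 1] := by
      rw [hcast, PySem.List.pyGetD_natCast, List.getD, List.getElem?_eq_getElem h1]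
      rfl
    rw [breaksB, PySem.List.pyRange_one_cons (by omega)]
    by_cases h2 : tags[p + 1] = num
    · have hpred : (!(PySem.List.pyGetD tags ((p : Int) + 1) 0 == num)) = false := by
        simp [hgetD, h2]
      rw [List.filter_cons_of_neg (by simp [hpred])]
      have ih := breaks_eq_run tags num (p + 1) h1
      rw [runM, dif_pos ⟨h1, by
        simp [List.getD, List.getElem?_eq_getElem h1, h2]⟩]
      rw [← ih, breaksB]
      have : ((p + 1 : Nat) : Int) + 1 = (p : Int) + 1 + 1 := by push_cast; ring
      rw [this]
    · have hpred : (!(PySem.List.pyGetD tags ((p : Int) + 1) 0 == num)) = true := by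
        simp [hgetD, h2]
      rw [List.filter_cons_of_pos (by simp [hgetD, h2])]
      rw [runM, dif_neg (by
        rw [List.getD, List.getElem?_eq_getElem h1]
        exact fun hc => h2 hc.2)]
      simp
  · rw [breaksB, PySem.List.pyRange_one_eq_nil (by omega)]
    rw [runM, dif_neg (by omega)]
    simp only [List.filter_nil]
    have h3 : tags.length = p + 1 := by omega
    rw [h3]
    push_cast
    ring
termination_by tags.length - p
decreasing_by omega

-- B's mark-selection over the suffix from index i equals seekM from i.
theorem marks_eq_seek (tags : List Int) (num : Int) (i : Nat) (hi : i ≤ tags.length) :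
    (match ((PySem.List.enumerate (tags.drop i) (i : Int)).filter
              (fun p => p.2 == num + 1)).map (fun p => p.1) with
     | [] => -1
     | s :: _ =>
         match breaksB tags num s with
         | [] => (tags.length : Int) - 1
         | b :: _ => b - 1) = seekM tags num i := by
  by_cases h : i < tags.length
  · rw [List.drop_eq_getElem_cons h, PySem.List.enumerate_cons, seekM, dif_neg (by omega)]
    by_cases hx : tags[i] = num + 1
    · rw [if_pos (by simp [List.getD, List.getElem?_eq_getElem h, hx])]
      rw [List.filter_cons_of_pos (by simp [hx])]
      simpa using breaks_eq_run tags num i h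
    · rw [if_neg (by simp [List.getD, List.getElem?_eq_getElem h, hx])]
      rw [List.filter_cons_of_neg (by simp [hx])]
      have ih := marks_eq_seek tags num (i + 1) (by omega)
      rw [← ih]
      have : ((i + 1 : Nat) : Int) = (i : Int) + 1 := by push_cast; ring
      rw [this]
  · have hd : tags.drop i = [] := List.drop_eq_nil_of_le (by omega)
    rw [hd, seekM, dif_pos (by omega), PySem.List.enumerate_nil]
    simp
termination_by tags.length - i
decreasing_by omega

-- ===== VERDICT (by name: the statement is the Claim_ definition above) =====
theorem find_tail_spec : Claim_equal_find_tail := by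
  intro tags num _
  unfold Spec_find_tail find_tail find_tail_alt marksB
  have hA := loopA_false_eq_seek tags num 0
  have hB := marks_eq_seek tags num 0 (Nat.zero_le _)
  simp only [List.drop_zero, Int.natCast_zero] at hA hB
  rw [hA, ← hB]
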